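-- pv_equiv track=rewrite | github.com/YiranXu/coding_problems_practice | Others/facebookpractice/ContiguousSubarrays.py | count_subarrays3
-- ===== SOURCE A (Python) =====
-- def count_subarrays3(arr):
--     n = len(arr)
--     res = [1] * n
--     stack = [-1]
--     #left
--     for i in range(n):
--         while len(stack) > 1 and arr[stack[-1]] < arr[i]:
--             stack.pop()
--         res[i] += i - stack[-1] - 1
--         stack.append(i)
--
--     # from right
--     stack = [n]
--     for i in range(n - 1, -1, -1):
--         while len(stack) > 1 and arr[stack[-1]] < arr[i]:
--             stack.pop()
--         res[i] += stack[-1] - i - 1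
--         stack.append(i)
--     return res
-- ===== SOURCE B (Python) =====
-- def count_subarrays3(arr):
--     n = len(arr)
--     res = []
--     for i in range(n):
--         left = 0
--         j = i - 1
--         while j >= 0 and arr[j] < arr[i]:
--             left += 1
--             j -= 1
--         right = 0
--         j = i + 1
--         while j < n and arr[j] < arr[i]:
--             right += 1
--             j += 1
--         res.append(1 + left + right)
--     return res
-- ===== Notes on version B (the rewrite author's own statement) =====
-- stated objective: simpler
-- what changed: Replaced the two global monotonic-stack passes by an independent outward scan per index (count consecutive strictly smaller neighbours on each side, stopping at the first element >= arr[i]); no stack is maintained.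
import Mathlib
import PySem

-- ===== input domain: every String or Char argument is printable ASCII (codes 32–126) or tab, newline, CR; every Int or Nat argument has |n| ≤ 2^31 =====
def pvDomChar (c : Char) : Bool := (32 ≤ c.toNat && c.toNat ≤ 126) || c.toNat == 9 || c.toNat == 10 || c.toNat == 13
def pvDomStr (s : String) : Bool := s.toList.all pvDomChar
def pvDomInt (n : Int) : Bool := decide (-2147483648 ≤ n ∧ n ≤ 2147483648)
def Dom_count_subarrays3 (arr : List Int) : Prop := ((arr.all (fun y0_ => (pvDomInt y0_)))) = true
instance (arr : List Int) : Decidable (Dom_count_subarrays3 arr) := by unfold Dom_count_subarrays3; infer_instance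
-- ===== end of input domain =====

-- B replaces A's two monotonic-stack passes by an independent outward scan per index
-- (stop at the first element ≥ arr[i] on each side); simpler, no stack, but not faster.

-- ===== PORT A =====
-- Python's `while len(stack) > 1 and arr[stack[-1]] < arr[i]: stack.pop()`.
-- The stack is kept with its TOP AT THE HEAD (Python appends/pops at the end).
-- Entries guarded by `len(stack) > 1` are previously pushed loop indices, always in
-- range, so `arr[stack[-1]]` is ported with pyGetD (the default 0 is never taken).
def popStack (arr : List Int) (x : Int) : List Int → List Int
  | t :: r :: rest =>
    if PySem.List.pyGetD arr t 0 < x then popStack arr x (r :: rest) else t :: r :: rest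
  | st => st

def count_subarrays3 (arr : List Int) : List Int :=
  let n : Int := arr.length
  let res : List Int := List.replicate arr.length (1 : Int)
  -- left pass; `stack[-1]` is `.headI` (the stack is never empty: the sentinel stays)
  let p1 := (PySem.List.pyRange 0 n 1).foldl (fun (st : List Int × List Int) i =>
      let stack := popStack arr (PySem.List.pyGetD arr i 0) st.2
      (PySem.List.pySetD st.1 i (PySem.List.pyGetD st.1 i 0 + (i - stack.headI - 1)),
       i :: stack)) (res, [(-1 : Int)])
  -- right pass
  let p2 := (PySem.List.pyRange (n - 1) (-1) (-1)).foldl (fun (st : List Int × List Int) i =>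
      let stack := popStack arr (PySem.List.pyGetD arr i 0) st.2
      (PySem.List.pySetD st.1 i (PySem.List.pyGetD st.1 i 0 + (stack.headI - i - 1)),
       i :: stack)) (p1.1, [n])
  p2.1

-- ===== PORT B =====
-- `while j >= 0 and arr[j] < x: left += 1; j -= 1`  (j stays in range when read)
def leftScan (arr : List Int) (x : Int) (j : Int) : Int :=
  if h : 0 ≤ j ∧ PySem.List.pyGetD arr j 0 < x then 1 + leftScan arr x (j - 1) else 0
termination_by (j + 1).toNat
decreasing_by omega

-- `while j < n and arr[j] < x: right += 1; j += 1`  (j ≥ 0 always at the call sites)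
def rightScan (arr : List Int) (x : Int) (j : Int) : Int :=
  if h : j < (arr.length : Int) ∧ PySem.List.pyGetD arr j 0 < x then 1 + rightScan arr x (j + 1) else 0
termination_by ((arr.length : Int) - j).toNat
decreasing_by omega

def count_subarrays3_alt (arr : List Int) : List Int :=
  let n : Int := arr.length
  (PySem.List.pyRange 0 n 1).map (fun i =>
    let x := PySem.List.pyGetD arr i 0
    1 + leftScan arr x (i - 1) + rightScan arr x (i + 1))

-- ===== PRECONDITION & SPEC =====
def Spec_count_subarrays3 (arr : List Int) (out : List Int) : Prop := out = count_subarrays3_alt arr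
instance (arr : List Int) (out : List Int) : Decidable (Spec_count_subarrays3 arr out) := by unfold Spec_count_subarrays3; infer_instance

-- ===== CLAIM (what is proved, stated in full; the proofs are below) =====
def Claim_equal_count_subarrays3 : Prop := ∀ (arr : List Int), Dom_count_subarrays3 arr → Spec_count_subarrays3 arr (count_subarrays3 arr)

-- ===== LEMMAS AND PROOFS =====

-- abbreviations used only by the proofs
def aGet (arr : List Int) (j : Int) : Int := PySem.List.pyGetD arr j 0
def lc (arr : List Int) (i : Int) : Int := leftScan arr (aGet arr i) (i - 1)
def rc (arr : List Int) (i : Int) : Int := rightScan arr (aGet arr i) (i + 1)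

lemma leftScan_eq (arr : List Int) (x j : Int) :
    leftScan arr x j = if 0 ≤ j ∧ aGet arr j < x then 1 + leftScan arr x (j - 1) else 0 := by
  rw [leftScan]; simp [aGet]

lemma rightScan_eq (arr : List Int) (x j : Int) :
    rightScan arr x j = if j < (arr.length : Int) ∧ aGet arr j < x then 1 + rightScan arr x (j + 1) else 0 := by
  rw [rightScan]; simp [aGet]

lemma leftScan_nonneg (arr : List Int) (x j : Int) : 0 ≤ leftScan arr x j := by
  induction hj : (j + 1).toNat using Nat.strong_induction_on generalizing j with
  | _ d ih =>
    rw [leftScan_eq]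
    split_ifs with h
    · have := ih ((j - 1) + 1).toNat (by omega) (j - 1) rfl
      omega
    · omega

-- every index skipped by the scan is valid and strictly below the threshold
lemma leftScan_run (arr : List Int) (x j : Int) :
    ∀ q, j - leftScan arr x j < q → q ≤ j → 0 ≤ q ∧ aGet arr q < x := by
  induction hj : (j + 1).toNat using Nat.strong_induction_on generalizing j with
  | _ d ih =>
    intro q hq1 hq2
    rw [leftScan_eq] at hq1
    split_ifs at hq1 with h
    · rcases eq_or_lt_of_le hq2 with rfl | hlt
      · exact h
      · have := leftScan_nonneg arr x (j - 1)
        exact ih ((j - 1) + 1).toNat (by omega) (j - 1) rfl q (by omega) (by omega)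
    · omega

-- a scan may be split at any point of its run
lemma leftScan_jump (arr : List Int) (x : Int) :
    ∀ (d : Nat) (j r : Int), j - r = d → r ≤ j →
      (∀ q, r < q → q ≤ j → 0 ≤ q ∧ aGet arr q < x) →
      leftScan arr x j = (j - r) + leftScan arr x r := by
  intro d
  induction d with
  | zero =>
    intro j r hd _ _
    have hjr : j = r := by omega
    subst hjr; simp
  | succ d ih =>
    intro j r hd hle hrun
    have hj := hrun j (by omega) le_rfl
    rw [leftScan_eq, if_pos hj]
    have := ih (j - 1) r (by omega) (by omega)
      (fun q h1 h2 => hrun q h1 (by omega))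
    omega

lemma rightScan_nonneg (arr : List Int) (x j : Int) : 0 ≤ rightScan arr x j := by
  induction hj : ((arr.length : Int) - j).toNat using Nat.strong_induction_on generalizing j with
  | _ d ih =>
    rw [rightScan_eq]
    split_ifs with h
    · have := ih ((arr.length : Int) - (j + 1)).toNat (by omega) (j + 1) rfl
      omega
    · omega

lemma rightScan_run (arr : List Int) (x j : Int) :
    ∀ q, j ≤ q → q < j + rightScan arr x j → aGet arr q < x ∧ q < (arr.length : Int) := by
  induction hj : ((arr.length : Int) - j).toNat using Nat.strong_induction_on generalizing j with
  | _ d ih =>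
    intro q hq1 hq2
    rw [rightScan_eq] at hq2
    split_ifs at hq2 with h
    · rcases eq_or_lt_of_le hq1 with rfl | hlt
      · exact ⟨h.2, h.1⟩
      · have := rightScan_nonneg arr x (j + 1)
        exact ih ((arr.length : Int) - (j + 1)).toNat (by omega) (j + 1) rfl q (by omega) (by omega)
    · omega

lemma rightScan_jump (arr : List Int) (x : Int) :
    ∀ (d : Nat) (j r : Int), r - j = d → j ≤ r →
      (∀ q, j ≤ q → q < r → aGet arr q < x ∧ q < (arr.length : Int)) →
      rightScan arr x j = (r - j) + rightScan arr x r := by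
  intro d
  induction d with
  | zero =>
    intro j r hd _ _
    have hjr : j = r := by omega
    subst hjr; simp
  | succ d ih =>
    intro j r hd hle hrun
    have hj := hrun j le_rfl (by omega)
    rw [rightScan_eq, if_pos ⟨hj.2, hj.1⟩]
    have := ih (j + 1) r (by omega) (by omega)
      (fun q h1 h2 => hrun q (by omega) h2)
    omega

-- the invariant of A's left stack: consecutive entries are linked by lc
def chainL (arr : List Int) : List Int → Prop
  | [] => False
  | [t] => t = -1
  | t :: r :: rest => 0 ≤ t ∧ t < (arr.length : Int) ∧ r = t - lc arr t - 1 ∧ chainL arr (r :: rest)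

def chainR (arr : List Int) : List Int → Prop
  | [] => False
  | [t] => t = (arr.length : Int)
  | t :: r :: rest => 0 ≤ t ∧ t < (arr.length : Int) ∧ r = t + rc arr t + 1 ∧ chainR arr (r :: rest)

lemma popStack_left (arr : List Int) (x : Int) :
    ∀ st, chainL arr st →
      chainL arr (popStack arr x st) ∧
      (popStack arr x st).headI = st.headI - leftScan arr x st.headI := by
  intro st
  induction st with
  | nil => exact fun h => h.elim
  | cons t rest ih =>
    intro h
    match rest, h with
    | [], h =>
      have ht : t = -1 := h
      subst ht
      refine ⟨h, ?_⟩
      simp only [popStack, List.headI]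
      rw [leftScan_eq, if_neg (by omega)]
      omega
    | r :: rest', h =>
      obtain ⟨h0, h1, hr, hc⟩ := h
      rw [popStack]
      by_cases hx : PySem.List.pyGetD arr t 0 < x
      · rw [if_pos hx]
        obtain ⟨ihc, ihh⟩ := ih hc
        refine ⟨ihc, ?_⟩
        have hrh : List.headI (r :: rest') = r := rfl
        rw [ihh, hrh]
        -- leftScan from t reaches r = t - lc t - 1 and continues there
        have hlc0 : 0 ≤ lc arr t := leftScan_nonneg arr (aGet arr t) (t - 1)
        have hjump : leftScan arr x t = (t - r) + leftScan arr x r := by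
          refine leftScan_jump arr x (t - r).toNat t r (by omega) (by omega) ?_
          intro q hq1 hq2
          rcases eq_or_lt_of_le hq2 with rfl | hlt
          · exact ⟨h0, hx⟩
          · have hrun := leftScan_run arr (aGet arr t) (t - 1) q (by simp only [lc] at hr; omega) (by omega)
            exact ⟨hrun.1, lt_trans hrun.2 hx⟩
        simp only [List.headI]
        omega
      · rw [if_neg hx]
        refine ⟨⟨h0, h1, hr, hc⟩, ?_⟩
        simp only [List.headI]
        rw [leftScan_eq, if_neg (by simp [aGet]; intro _; simpa [aGet] using hx)]
        omega

lemma popStack_right (arr : List Int) (x : Int) :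
    ∀ st, chainR arr st →
      chainR arr (popStack arr x st) ∧
      (popStack arr x st).headI = st.headI + rightScan arr x st.headI := by
  intro st
  induction st with
  | nil => exact fun h => h.elim
  | cons t rest ih =>
    intro h
    match rest, h with
    | [], h =>
      have ht : t = (arr.length : Int) := h
      subst ht
      refine ⟨h, ?_⟩
      simp only [popStack, List.headI]
      rw [rightScan_eq, if_neg (by omega)]
      omega
    | r :: rest', h =>
      obtain ⟨h0, h1, hr, hc⟩ := h
      rw [popStack]
      by_cases hx : PySem.List.pyGetD arr t 0 < x
      · rw [if_pos hx]
        obtain ⟨ihc, ihh⟩ := ih hc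
        refine ⟨ihc, ?_⟩
        have hrh : List.headI (r :: rest') = r := rfl
        rw [ihh, hrh]
        have hrc0 : 0 ≤ rc arr t := rightScan_nonneg arr (aGet arr t) (t + 1)
        have hjump : rightScan arr x t = (r - t) + rightScan arr x r := by
          refine rightScan_jump arr x (r - t).toNat t r (by omega) (by omega) ?_
          intro q hq1 hq2
          rcases eq_or_lt_of_le hq1 with rfl | hlt
          · exact ⟨hx, h1⟩
          · have hrun := rightScan_run arr (aGet arr t) (t + 1) q (by omega) (by simp only [rc] at hr; omega)
            exact ⟨lt_trans hrun.1 hx, hrun.2⟩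
        simp only [List.headI]
        omega
      · rw [if_neg hx]
        refine ⟨⟨h0, h1, hr, hc⟩, ?_⟩
        simp only [List.headI]
        rw [rightScan_eq, if_neg (by simp [aGet]; intro _; simpa [aGet] using hx)]
        omega

lemma chainL_cons (arr : List Int) (t : Int) (st : List Int) (h : chainL arr st)
    (h0 : 0 ≤ t) (h1 : t < (arr.length : Int)) (h2 : st.headI = t - lc arr t - 1) :
    chainL arr (t :: st) := by
  match st, h with
  | r :: rest, h => exact ⟨h0, h1, by simpa using h2, h⟩

lemma chainR_cons (arr : List Int) (t : Int) (st : List Int) (h : chainR arr st)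
    (h0 : 0 ≤ t) (h1 : t < (arr.length : Int)) (h2 : st.headI = t + rc arr t + 1) :
    chainR arr (t :: st) := by
  match st, h with
  | r :: rest, h => exact ⟨h0, h1, by simpa using h2, h⟩

lemma pyGetD_map_range (n : Nat) (f : Nat → Int) (k : Nat) (h : k < n) :
    PySem.List.pyGetD ((List.range n).map f) (k : Int) 0 = f k := by
  rw [PySem.List.pyGetD_natCast]
  simp [List.getD_eq_getElem?_getD, h]

lemma set_map_range (n : Nat) (f : Nat → Int) (k : Nat) (v : Int) (_hk : k < n) :
    ((List.range n).map f).set k v = (List.range n).map (fun i : Nat => if i = k then v else f i) := by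
  apply List.ext_getElem
  · simp
  · intro i h1 h2
    simp only [List.getElem_set, List.getElem_map, List.getElem_range]
    split_ifs with h3 h4 <;> first | rfl | omega

lemma left_pass (arr : List Int) :
    ∀ k : Nat, k ≤ arr.length →
      ∃ st,
        ((PySem.List.pyRange 0 (k : Int) 1).foldl (fun (st : List Int × List Int) i =>
          (PySem.List.pySetD st.1 i (PySem.List.pyGetD st.1 i 0 +
              (i - (popStack arr (PySem.List.pyGetD arr i 0) st.2).headI - 1)),
           i :: popStack arr (PySem.List.pyGetD arr i 0) st.2))
          (List.replicate arr.length (1 : Int), [(-1 : Int)]))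
        = ((List.range arr.length).map (fun i : Nat => if (i : Int) < (k : Int) then 1 + lc arr i else 1), st)
        ∧ chainL arr st ∧ st.headI = (k : Int) - 1 := by
  intro k
  induction k with
  | zero =>
    intro _
    refine ⟨[-1], ?_, by exact rfl, by simp⟩
    rw [PySem.List.pyRange_one_eq_nil (by omega)]
    simp only [List.foldl_nil]
    congr 1
    symm
    have h1 : ∀ i ∈ List.range arr.length,
        (if ((i : Nat) : Int) < ((0 : Nat) : Int) then 1 + lc arr (i : Int) else 1) = (1 : Int) := by
      intro i _; simp
    rw [List.map_congr_left h1, List.map_const']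
    simp
  | succ k ih =>
    intro hk1
    obtain ⟨st, hfold, hchain, hhead⟩ := ih (by omega)
    have hkn : k < arr.length := by omega
    have hcast : ((k + 1 : Nat) : Int) = (k : Int) + 1 := by push_cast; ring
    rw [hcast, PySem.List.pyRange_one_succ_right (by omega), List.foldl_append, hfold,
        List.foldl_cons, List.foldl_nil]
    obtain ⟨pc, ph⟩ := popStack_left arr (PySem.List.pyGetD arr (k : Int) 0) st hchain
    rw [hhead] at ph
    have hx : PySem.List.pyGetD arr (k : Int) 0 = aGet arr (k : Int) := rfl
    have hph : (popStack arr (PySem.List.pyGetD arr (k : Int) 0) st).headI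
        = (k : Int) - lc arr (k : Int) - 1 := by
      rw [ph, hx]; simp only [lc]; omega
    refine ⟨(k : Int) :: popStack arr (PySem.List.pyGetD arr (k : Int) 0) st, ?_, ?_, ?_⟩
    · simp only [Prod.mk.injEq]
      refine ⟨?_, by trivial⟩
      have hget : PySem.List.pyGetD
          ((List.range arr.length).map (fun i : Nat => if (i : Int) < (k : Int) then 1 + lc arr i else 1))
          (k : Int) 0 = 1 := by
        rw [pyGetD_map_range _ _ _ hkn]; simp
      rw [hget, hph, PySem.List.pySetD_natCast,
          set_map_range _ _ _ _ hkn]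
      apply List.map_congr_left
      intro i hi
      by_cases hik : i = k
      · subst hik
        rw [if_pos rfl, if_pos (by omega)]
        ring
      · rw [if_neg hik]
        have : ((i : Int) < (k : Int)) ↔ ((i : Int) < (k : Int) + 1) := by
          constructor <;> intro h <;> omega
        by_cases h2 : (i : Int) < (k : Int)
        · rw [if_pos h2, if_pos (by omega)]
        · rw [if_neg h2, if_neg (by omega)]
    · exact chainL_cons arr _ _ pc (by omega) (by omega) hph
    · simp only [List.headI]; omega

lemma right_pass (arr : List Int) :
    ∀ k : Nat, k ≤ arr.length → ∀ st, chainR arr st → st.headI = (k : Int) →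
      ((PySem.List.pyRange ((k : Int) - 1) (-1) (-1)).foldl (fun (st : List Int × List Int) i =>
          (PySem.List.pySetD st.1 i (PySem.List.pyGetD st.1 i 0 +
              ((popStack arr (PySem.List.pyGetD arr i 0) st.2).headI - i - 1)),
           i :: popStack arr (PySem.List.pyGetD arr i 0) st.2))
        ((List.range arr.length).map
          (fun i : Nat => if (k : Int) ≤ (i : Int) then 1 + lc arr i + rc arr i else 1 + lc arr i), st)).1
      = (List.range arr.length).map (fun i : Nat => 1 + lc arr i + rc arr i) := by
  intro k
  induction k with
  | zero =>
    intro _ st _ _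
    rw [show ((0 : Nat) : Int) - 1 = -1 by omega, PySem.List.pyRange_neg_one_eq_nil (by omega),
        List.foldl_nil]
    apply List.map_congr_left
    intro i _
    rw [if_pos (by omega)]
  | succ k ih =>
    intro hk1 st hchain hhead
    have hkn : k < arr.length := by omega
    have hcast : ((k + 1 : Nat) : Int) - 1 = (k : Int) := by push_cast; ring
    rw [hcast, PySem.List.pyRange_neg_one_cons (by omega), List.foldl_cons]
    obtain ⟨pc, ph⟩ := popStack_right arr (PySem.List.pyGetD arr (k : Int) 0) st hchain
    rw [hhead] at ph
    have hx : PySem.List.pyGetD arr (k : Int) 0 = aGet arr (k : Int) := rfl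
    have hph : (popStack arr (PySem.List.pyGetD arr (k : Int) 0) st).headI
        = (k : Int) + rc arr (k : Int) + 1 := by
      rw [ph, hx]; simp only [rc]
      push_cast; ring
    have hget : PySem.List.pyGetD
        ((List.range arr.length).map
          (fun i : Nat => if ((k + 1 : Nat) : Int) ≤ (i : Int) then 1 + lc arr i + rc arr i else 1 + lc arr i))
        (k : Int) 0 = 1 + lc arr (k : Int) := by
      rw [pyGetD_map_range _ _ _ hkn, if_neg (by push_cast; omega)]
    have hres : PySem.List.pySetD
        ((List.range arr.length).map
          (fun i : Nat => if ((k + 1 : Nat) : Int) ≤ (i : Int) then 1 + lc arr i + rc arr i else 1 + lc arr i))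
        (k : Int)
        (PySem.List.pyGetD
          ((List.range arr.length).map
            (fun i : Nat => if ((k + 1 : Nat) : Int) ≤ (i : Int) then 1 + lc arr i + rc arr i else 1 + lc arr i))
          (k : Int) 0 +
          ((popStack arr (PySem.List.pyGetD arr (k : Int) 0) st).headI - (k : Int) - 1))
        = (List.range arr.length).map
          (fun i : Nat => if (k : Int) ≤ (i : Int) then 1 + lc arr i + rc arr i else 1 + lc arr i) := by
      rw [hget, hph, PySem.List.pySetD_natCast, set_map_range _ _ _ _ hkn]
      apply List.map_congr_left
      intro i hi
      by_cases hik : i = k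
      · subst hik
        rw [if_pos rfl, if_pos (by omega)]
        ring
      · rw [if_neg hik]
        by_cases h2 : ((k + 1 : Nat) : Int) ≤ (i : Int)
        · rw [if_pos h2, if_pos (by push_cast at h2 ⊢; omega)]
        · rw [if_neg h2, if_neg (by push_cast at h2 ⊢; omega)]
    rw [hres]
    exact ih (by omega) _ (chainR_cons arr _ _ pc (by omega) (by omega) hph)
      (by simp only [List.headI])

lemma main_eq (arr : List Int) : count_subarrays3 arr = count_subarrays3_alt arr := by
  obtain ⟨st, hfold, hchain, hhead⟩ := left_pass arr arr.length le_rfl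
  simp only [count_subarrays3, count_subarrays3_alt]
  rw [hfold]
  have hcongr : ∀ i ∈ List.range arr.length,
      (if (i : Int) < ((arr.length : Nat) : Int) then 1 + lc arr i else 1)
      = (if ((arr.length : Nat) : Int) ≤ (i : Int) then 1 + lc arr i + rc arr i else 1 + lc arr i) := by
    intro i hi
    have : i < arr.length := List.mem_range.mp hi
    rw [if_pos (by omega), if_neg (by omega)]
  rw [List.map_congr_left hcongr]
  rw [right_pass arr arr.length le_rfl [(arr.length : Int)] (by exact rfl) (by simp)]
  rw [PySem.List.pyRange_one]
  simp only [Int.sub_zero, Int.toNat_natCast, List.map_map]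
  apply List.map_congr_left
  intro i _
  simp only [Function.comp, lc, rc, aGet, zero_add]

-- ===== VERDICT (by name: the statement is the Claim_ definition above) =====
theorem count_subarrays3_spec : Claim_equal_count_subarrays3 := by
  intro arr _
  unfold Spec_count_subarrays3
  exact main_eq arr
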